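-- pv_equiv track=rewrite | github.com/v-ali-f/school-tracker | app/control_works.py | _normalize_class_token
-- ===== SOURCE A (Python) =====
-- def _normalize_class_token(value):
--     raw = (value or '').strip().upper()
--     if not raw:
--         return ''
--     translate_map = str.maketrans({
--         'A': 'А', 'B': 'В', 'C': 'С', 'E': 'Е', 'H': 'Н', 'K': 'К', 'M': 'М',
--         'O': 'О', 'P': 'Р', 'T': 'Т', 'X': 'Х', 'Y': 'У'
--     })
--     raw = raw.translate(translate_map)
--     for ch in (' ', '-', '–', '—', '.', '/', '\\'):
--         raw = raw.replace(ch, '')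
--     return raw
-- ===== SOURCE B (Python) =====
-- def _normalize_class_token(value):
--     raw = (value or '').strip().upper()
--     keys = ' -\u2013\u2014./\\ABCEHKMOPTXY'
--     vals = '\u0410\u0412\u0421\u0415\u041d\u041a\u041c\u041e\u0420\u0422\u0425\u0423'
--     out = []
--     i = 0
--     while i < len(raw):
--         k = keys.find(raw[i])
--         if k < 0:
--             out.append(raw[i])
--         elif k >= 7:
--             out.append(vals[k - 7])
--         i += 1
--     return ''.join(out)
-- ===== Notes on version B (the rewrite author's own statement) =====
-- stated objective: alternative
-- what changed: Replaces A's str.translate pass followed by seven sequential str.replace passes with one explicit index-driven while loop that looks each character up in a single combined key string (separators at indices 0-6, latin letters at 7-18) and uses index arithmetic into a parallel value string to drop or substitute it.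
import Mathlib
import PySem

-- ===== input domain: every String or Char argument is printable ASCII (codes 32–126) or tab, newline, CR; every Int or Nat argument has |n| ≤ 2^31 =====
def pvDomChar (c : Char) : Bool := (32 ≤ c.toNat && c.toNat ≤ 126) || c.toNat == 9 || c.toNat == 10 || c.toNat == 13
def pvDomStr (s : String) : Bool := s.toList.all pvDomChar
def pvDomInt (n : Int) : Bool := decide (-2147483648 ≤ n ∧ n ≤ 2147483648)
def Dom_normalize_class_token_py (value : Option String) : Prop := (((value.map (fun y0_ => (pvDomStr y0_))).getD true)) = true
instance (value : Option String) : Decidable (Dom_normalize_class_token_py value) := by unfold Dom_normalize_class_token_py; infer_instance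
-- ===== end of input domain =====

-- B replaces A's translate pass plus seven sequential replace passes with one explicit scan
-- that looks each character up in a single combined key string and uses index arithmetic into a
-- parallel value string (indices 0–6 are separators to drop, 7–18 latin letters to substitute).

-- ===== PORT A =====
-- the str.maketrans table applied by str.translate: a per-character mapping
def pvTransA (c : Char) : Char :=
  if c = 'A' then 'А' else if c = 'B' then 'В' else if c = 'C' then 'С' else
  if c = 'E' then 'Е' else if c = 'H' then 'Н' else if c = 'K' then 'К' else
  if c = 'M' then 'М' else if c = 'O' then 'О' else if c = 'P' then 'Р' else
  if c = 'T' then 'Т' else if c = 'X' then 'Х' else if c = 'Y' then 'У' else c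

def pvSepsA : List String := [" ", "-", "–", "—", ".", "/", "\\"]

def normalize_class_token_py (value : Option String) : String :=
  let raw := PySem.Str.upper (PySem.Str.strip (value.getD ""))
  if raw.toList = [] then ""                                     -- if not raw: return ''
  else
    let raw := String.ofList (raw.toList.map pvTransA)           -- raw = raw.translate(translate_map)
    pvSepsA.foldl (fun r ch => PySem.Str.replace r ch "") raw    -- for ch in (...): raw = raw.replace(ch, '')

-- ===== PORT B =====
def pvKeys : List Char := " -–—./\\ABCEHKMOPTXY".toList   -- keys: 7 separators then 12 latin letters
def pvVals : List Char := "АВСЕНКМОРТХУ".toList           -- vals: the 12 cyrillic replacements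

-- one iteration of B's while loop: k = keys.find(raw[i]); drop / substitute / keep
def pvEmitB (c : Char) : List Char :=
  let k := PySem.Chars.find pvKeys [c]
  if k < 0 then [c]
  else if 7 ≤ k then [(PySem.List.pyGet? pvVals (k - 7)).getD c]  -- vals[k-7]; 7 ≤ k ≤ 18 so always in range
  else []

def normalize_class_token_py_alt (value : Option String) : String :=
  let raw := PySem.Str.upper (PySem.Str.strip (value.getD ""))
  String.ofList (raw.toList.foldl (fun out c => out ++ pvEmitB c) [])  -- the while loop; ''.join(out)

-- ===== PRECONDITION & SPEC =====
def Spec_normalize_class_token_py (value : Option String) (out : String) : Prop := out = normalize_class_token_py_alt value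
instance (value : Option String) (out : String) : Decidable (Spec_normalize_class_token_py value out) := by unfold Spec_normalize_class_token_py; infer_instance

-- ===== CLAIM (what is proved, stated in full; the proofs are below) =====
def Claim_equal_normalize_class_token_py : Prop := ∀ (value : Option String), Dom_normalize_class_token_py value → Spec_normalize_class_token_py value (normalize_class_token_py value)

-- ===== LEMMAS AND PROOFS =====

-- the per-character effect both programs share: drop separators, substitute lookalikes
def pvIsSep (c : Char) : Bool := [' ', '-', '–', '—', '.', '/', '\\'].contains c
def pvEmit (c : Char) : List Char := if pvIsSep c then [] else [pvTransA c]

-- Python's s.replace(c, '') for a single character c deletes every occurrence of c: a filter.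
theorem pv_replace_go_single (c : Char) :
    ∀ (fuel : Nat) (l acc : List Char), l.length ≤ fuel →
      PySem.Chars.replace.go [c] [] fuel l acc = acc.reverse ++ l.filter (· ≠ c) := by
  intro fuel
  induction fuel with
  | zero =>
    intro l acc h
    have : l = [] := List.eq_nil_of_length_eq_zero (Nat.le_zero.mp h)
    subst this
    simp [PySem.Chars.replace.go]
  | succ n ih =>
    intro l acc h
    cases l with
    | nil => simp [PySem.Chars.replace.go]
    | cons x t =>
      simp only [PySem.Chars.replace.go]
      by_cases hx : x = c
      · subst hx
        have hp : List.isPrefixOf [x] (x :: t) = true := by simp [List.isPrefixOf]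
        rw [if_pos hp]
        simp only [List.length_singleton, List.drop_succ_cons, List.drop_zero,
          List.reverse_nil, List.nil_append]
        rw [ih t acc (by simpa using Nat.le_of_succ_le_succ h)]
        simp
      · have hp : List.isPrefixOf [c] (x :: t) = false := by
          simp [List.isPrefixOf]; exact fun hcx => absurd hcx.symm hx
        rw [if_neg (by simp [hp])]
        rw [ih t (x :: acc) (by simpa using Nat.le_of_succ_le_succ h)]
        simp [hx]

theorem pv_replace_single (c : Char) (l : List Char) :
    PySem.Chars.replace l [c] [] = l.filter (· ≠ c) := by
  simp only [PySem.Chars.replace, List.isEmpty]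
  exact pv_replace_go_single c l.length l [] (le_refl _)

-- A's seven chained per-character filters = one filter by "not a separator"
theorem pv_sep_pred (d : Char) :
    (decide (d ≠ '\\') && (decide (d ≠ '/') && (decide (d ≠ '.') && (decide (d ≠ '—') &&
     (decide (d ≠ '–') && (decide (d ≠ '-') && decide (d ≠ ' '))))))) = !pvIsSep d := by
  simp only [pvIsSep, List.contains_cons, List.contains_nil, Bool.or_false, Bool.not_or,
    decide_not]
  ac_rfl

-- the translate map sends separators to separators and non-separators to non-separators
theorem pv_trans_sep (c : Char) : pvIsSep (pvTransA c) = pvIsSep c := by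
  by_cases h1 : c = 'A'; · subst h1; decide
  by_cases h2 : c = 'B'; · subst h2; decide
  by_cases h3 : c = 'C'; · subst h3; decide
  by_cases h4 : c = 'E'; · subst h4; decide
  by_cases h5 : c = 'H'; · subst h5; decide
  by_cases h6 : c = 'K'; · subst h6; decide
  by_cases h7 : c = 'M'; · subst h7; decide
  by_cases h8 : c = 'O'; · subst h8; decide
  by_cases h9 : c = 'P'; · subst h9; decide
  by_cases h10 : c = 'T'; · subst h10; decide
  by_cases h11 : c = 'X'; · subst h11; decide
  by_cases h12 : c = 'Y'; · subst h12; decide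
  rw [show pvTransA c = c by simp [pvTransA, h1, h2, h3, h4, h5, h6, h7, h8, h9, h10, h11, h12]]

-- A's pipeline on the character list is the per-character emit, concatenated
theorem pvA_core (l : List Char) :
    (pvSepsA.foldl (fun r ch => PySem.Str.replace r ch "") (String.ofList (l.map pvTransA))).toList
    = l.flatMap pvEmit := by
  simp only [pvSepsA, List.foldl, PySem.Str.toList_replace,
    show (" " : String).toList = [' '] from rfl, show ("-" : String).toList = ['-'] from rfl,
    show ("–" : String).toList = ['–'] from rfl, show ("—" : String).toList = ['—'] from rfl,
    show ("." : String).toList = ['.'] from rfl, show ("/" : String).toList = ['/'] from rfl,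
    show ("\\" : String).toList = ['\\'] from rfl, show ("" : String).toList = [] from rfl,
    pv_replace_single, String.toList_ofList]
  simp only [List.filter_filter]
  rw [show (fun a => decide (a ≠ '\\') && (decide (a ≠ '/') && (decide (a ≠ '.') &&
      (decide (a ≠ '—') && (decide (a ≠ '–') && (decide (a ≠ '-') && decide (a ≠ ' ')))))))
      = fun a => !pvIsSep a from funext pv_sep_pred]
  induction l with
  | nil => rfl
  | cons c t ih =>
    simp only [List.map_cons, List.filter_cons, List.flatMap_cons, pv_trans_sep, pvEmit]
    cases hs : pvIsSep c <;> simp_all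

-- B's lookup-and-emit step computes exactly pvEmit
theorem pv_emitB_eq (c : Char) : pvEmitB c = pvEmit c := by
  by_cases h1 : c = ' '; · subst h1; decide
  by_cases h2 : c = '-'; · subst h2; decide
  by_cases h3 : c = '–'; · subst h3; decide
  by_cases h4 : c = '—'; · subst h4; decide
  by_cases h5 : c = '.'; · subst h5; decide
  by_cases h6 : c = '/'; · subst h6; decide
  by_cases h7 : c = '\\'; · subst h7; decide
  by_cases h8 : c = 'A'; · subst h8; decide
  by_cases h9 : c = 'B'; · subst h9; decide
  by_cases h10 : c = 'C'; · subst h10; decide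
  by_cases h11 : c = 'E'; · subst h11; decide
  by_cases h12 : c = 'H'; · subst h12; decide
  by_cases h13 : c = 'K'; · subst h13; decide
  by_cases h14 : c = 'M'; · subst h14; decide
  by_cases h15 : c = 'O'; · subst h15; decide
  by_cases h16 : c = 'P'; · subst h16; decide
  by_cases h17 : c = 'T'; · subst h17; decide
  by_cases h18 : c = 'X'; · subst h18; decide
  by_cases h19 : c = 'Y'; · subst h19; decide
  -- c is none of the 19 key characters: the find misses, B keeps c; A's map keeps it too
  have hmem : c ∉ pvKeys := by
    simp [pvKeys, h1, h2, h3, h4, h5, h6, h7, h8, h9, h10, h11, h12, h13, h14, h15,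
      h16, h17, h18, h19]
  have hfind : PySem.Chars.find pvKeys [c] = -1 := by
    rw [PySem.Chars.find_eq_neg_one_iff]
    intro hinf
    exact hmem (hinf.sublist.subset (List.mem_singleton_self c))
  simp only [pvEmitB, hfind, pvEmit]
  rw [if_pos (by norm_num),
    show pvIsSep c = false by simp [pvIsSep, h1, h2, h3, h4, h5, h6, h7],
    show pvTransA c = c by
      simp [pvTransA, h8, h9, h10, h11, h12, h13, h14, h15, h16, h17, h18, h19]]
  rfl

-- B's loop accumulates exactly the concatenation of the per-character emits
theorem pvB_core (l : List Char) :
    ∀ init : List Char, l.foldl (fun out c => out ++ pvEmitB c) init = init ++ l.flatMap pvEmit := by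
  induction l with
  | nil => simp
  | cons c t ih =>
    intro init
    rw [List.foldl_cons, ih (init ++ pvEmitB c), pv_emitB_eq, List.flatMap_cons,
      List.append_assoc]

-- ===== VERDICT (by name: the statement is the Claim_ definition above) =====
theorem normalize_class_token_py_spec : Claim_equal_normalize_class_token_py := by
  intro value _
  unfold Spec_normalize_class_token_py normalize_class_token_py normalize_class_token_py_alt
  apply String.toList_inj.mp
  by_cases h : (PySem.Str.upper (PySem.Str.strip (value.getD ""))).toList = []
  · simp [h]
  · simp only [if_neg h]
    rw [pvA_core, String.toList_ofList, pvB_core, List.nil_append]
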